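-- pv_equiv track=rewrite | github.com/Coder-Pham/Interview-Code | Prampt/Drone.py | min_energy_drone
-- ===== SOURCE A (Python) =====
-- def min_energy_drone(route):
--     lastHeight = route[0][2]
--     totalEne = 0
--     energy = 0
--     for i in range(1, len(route)):
--         if lastHeight < route[i][2]:
--             energy -= route[i][2] - lastHeight
--         else:
--             energy += lastHeight - route[i][2]
--         if energy < 0:
--             totalEne -= energy
--             energy = 0
--     return totalEne
-- ===== SOURCE B (Python) =====
-- def min_energy_drone(route):
--     # Backward pass: best = max over prefixes (of the remaining tail) of the
--     # summed height deltas, via the right-fold recurrence best = max(0, d + best).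
--     h0 = route[0][2]
--     best = 0
--     for p in reversed(route[1:]):
--         best = max(0, p[2] - h0 + best)
--     return best
-- ===== Notes on version B (the rewrite author's own statement) =====
-- stated objective: alternative
-- what changed: A's forward deficit-and-reset accumulator is replaced by a single backward pass with the right-fold recurrence best = max(0, delta + best), computing the maximal prefix-sum of height deltas from the end of the route.
import Mathlib
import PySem

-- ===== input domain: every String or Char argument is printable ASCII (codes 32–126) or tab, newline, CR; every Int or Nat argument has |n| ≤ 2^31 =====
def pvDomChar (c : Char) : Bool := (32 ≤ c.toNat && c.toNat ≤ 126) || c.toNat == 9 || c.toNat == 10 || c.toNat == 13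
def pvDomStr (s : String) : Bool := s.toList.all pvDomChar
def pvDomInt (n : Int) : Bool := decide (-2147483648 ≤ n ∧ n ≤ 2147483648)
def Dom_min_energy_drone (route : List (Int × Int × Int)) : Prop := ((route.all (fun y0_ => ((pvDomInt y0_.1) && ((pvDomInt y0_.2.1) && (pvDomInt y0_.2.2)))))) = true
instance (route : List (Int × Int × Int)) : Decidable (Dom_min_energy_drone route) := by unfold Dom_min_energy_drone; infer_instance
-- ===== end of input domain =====

-- B replaces A's forward deficit-and-reset accumulator by a backward pass with best = max(0, delta + best) (alternative); both raise on [] (outside Pre_).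

-- ===== PORT A =====
-- A's loop over route[1:]; lastHeight is never reassigned in A, so it is the constant h0 here.
def minEnergyLoopA (h0 : Int) : List (Int × Int × Int) → Int → Int → Int
  | [], totalEne, _ => totalEne
  | p :: rest, totalEne, energy =>
    let e1 := if h0 < p.2.2 then energy - (p.2.2 - h0) else energy + (h0 - p.2.2)
    if e1 < 0 then minEnergyLoopA h0 rest (totalEne - e1) 0
    else minEnergyLoopA h0 rest totalEne e1

def min_energy_drone (route : List (Int × Int × Int)) : Int :=
  match route with
  | [] => 0  -- route[0][2] raises IndexError in Python: excluded by Pre_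
  | p :: rest => minEnergyLoopA p.2.2 rest 0 0

-- ===== PORT B =====
-- B iterates over reversed(route[1:]) with best = max(0, p[2] - h0 + best).
def min_energy_drone_alt (route : List (Int × Int × Int)) : Int :=
  match route with
  | [] => 0  -- route[0][2] raises IndexError in Python: excluded by Pre_
  | p :: rest => rest.reverse.foldl (fun best q => max 0 (q.2.2 - p.2.2 + best)) 0

-- ===== PRECONDITION & SPEC =====
-- A evaluates route[0][2]: the empty route raises IndexError, so it is excluded.
def Pre_min_energy_drone (route : List (Int × Int × Int)) : Prop := route ≠ []
instance (route : List (Int × Int × Int)) : Decidable (Pre_min_energy_drone route) := by unfold Pre_min_energy_drone; infer_instance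
def pvWitness_min_energy_drone : (List (Int × Int × Int)) := [(0, 0, 5), (1, 1, 2), (2, 2, 9)]

def Spec_min_energy_drone (route : List (Int × Int × Int)) (out : Int) : Prop := out = min_energy_drone_alt route
instance (route : List (Int × Int × Int)) (out : Int) : Decidable (Spec_min_energy_drone route out) := by unfold Spec_min_energy_drone; infer_instance

-- ===== CLAIM =====
def Claim_equal_min_energy_drone : Prop := ∀ (route : List (Int × Int × Int)), Dom_min_energy_drone route → Pre_min_energy_drone route → Spec_min_energy_drone route (min_energy_drone route)

-- ===== LEMMAS AND PROOFS =====

-- The right-fold form of B's backward loop.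
def maxPrefix (h0 : Int) (l : List (Int × Int × Int)) : Int :=
  l.foldr (fun q best => max 0 (q.2.2 - h0 + best)) 0

theorem maxPrefix_nonneg (h0 : Int) (l : List (Int × Int × Int)) : 0 ≤ maxPrefix h0 l := by
  cases l with
  | nil => simp [maxPrefix]
  | cons p r => simp [maxPrefix]

-- Invariant: A's loop from state (tot, energy) with 0 ≤ energy returns
-- tot + max 0 (maxPrefix rest - energy).
theorem minEnergyLoopA_eq (h0 : Int) (rest : List (Int × Int × Int)) :
    ∀ (tot e : Int), 0 ≤ e →
      minEnergyLoopA h0 rest tot e = tot + max 0 (maxPrefix h0 rest - e) := by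
  induction rest with
  | nil => intro tot e he; simp [minEnergyLoopA, maxPrefix]; omega
  | cons p r ih =>
    intro tot e he
    have hM : 0 ≤ maxPrefix h0 r := maxPrefix_nonneg h0 r
    have hcons : maxPrefix h0 (p :: r) = max 0 (p.2.2 - h0 + maxPrefix h0 r) := by
      simp [maxPrefix]
    simp only [minEnergyLoopA]
    have he1 : (if h0 < p.2.2 then e - (p.2.2 - h0) else e + (h0 - p.2.2))
        = e - (p.2.2 - h0) := by split_ifs <;> ring
    rw [he1]
    by_cases h : e - (p.2.2 - h0) < 0
    · rw [if_pos h, ih _ 0 le_rfl, hcons]; omega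
    · rw [if_neg h, ih _ _ (by omega), hcons]; omega

-- ===== VERDICT =====
theorem min_energy_drone_spec : Claim_equal_min_energy_drone := by
  intro route _ hpre
  unfold Spec_min_energy_drone min_energy_drone min_energy_drone_alt
  match route with
  | [] => exact absurd rfl hpre
  | p :: rest =>
    show minEnergyLoopA p.2.2 rest 0 0
        = rest.reverse.foldl (fun best q => max 0 (q.2.2 - p.2.2 + best)) 0
    have hb : rest.reverse.foldl (fun best q => max 0 (q.2.2 - p.2.2 + best)) 0
        = maxPrefix p.2.2 rest := by
      rw [List.foldl_reverse]; rfl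
    rw [hb, minEnergyLoopA_eq p.2.2 rest 0 0 le_rfl]
    have := maxPrefix_nonneg p.2.2 rest
    omega
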